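-- pv_equiv track=rewrite | github.com/Ayushhgit/DisAgent | MainAgent/core/runtime/dependency_graph.py | reverse_graph
-- ===== SOURCE A (Python) =====
-- from typing import List, Dict, Set
--
-- def reverse_graph(graph: Dict[str, List[str]]) -> Dict[str, Set[str]]:
--     rev: Dict[str, Set[str]] = {k: set() for k in graph}
--     for src, targets in graph.items():
--         for t in targets:
--             if t not in rev:
--                 rev[t] = set()
--             rev[t].add(src)
--     return rev
-- ===== SOURCE B (Python) =====
-- def reverse_graph(graph):
--     # Gather formulation: list all nodes in A's discovery order, then for each
--     # node collect its predecessors by scanning the (pre-hashed) adjacency lists.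
--     nodes = list(graph)
--     seen = set(nodes)
--     for targets in graph.values():
--         for t in targets:
--             if t not in seen:
--                 seen.add(t)
--                 nodes.append(t)
--     tsets = [(s, set(ts)) for s, ts in graph.items()]
--     return {n: {s for s, ts in tsets if n in ts} for n in nodes}
-- ===== Notes on version B (the rewrite author's own statement) =====
-- stated objective: alternative
-- what changed: B replaces A's single edge-scatter pass that mutates per-target sets with a per-node gather: it computes the node order once, hashes each adjacency list, and builds each node's predecessor set by a comprehension scanning all sources.
import Mathlib
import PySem

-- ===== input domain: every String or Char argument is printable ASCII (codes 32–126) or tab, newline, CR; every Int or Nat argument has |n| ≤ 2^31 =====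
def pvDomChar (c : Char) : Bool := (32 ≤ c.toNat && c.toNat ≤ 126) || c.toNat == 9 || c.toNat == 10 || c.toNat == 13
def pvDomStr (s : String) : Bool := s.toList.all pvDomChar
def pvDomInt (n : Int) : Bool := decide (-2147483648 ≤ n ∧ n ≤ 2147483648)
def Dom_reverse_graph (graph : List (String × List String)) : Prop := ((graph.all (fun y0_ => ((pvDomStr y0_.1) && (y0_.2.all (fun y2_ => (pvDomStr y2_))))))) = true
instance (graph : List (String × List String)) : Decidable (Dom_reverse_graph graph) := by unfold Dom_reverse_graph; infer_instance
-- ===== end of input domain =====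

-- B is an alternative gather formulation (per-node predecessor scan) of A's edge-scatter pass; same results, not claimed faster.

-- ===== PORT A =====
-- rev = {k: set() for k in graph}; for src, targets: for t: if t not in rev: rev[t] = set(); rev[t].add(src)
def reverse_graph (graph : List (String × List String)) : List (String × List String) :=
  let g := PySem.Dict.ofList graph
  let rev : PySem.Dict String (PySem.Set String) :=
    g.items.foldl (fun rev kv => rev.insert kv.1 PySem.Set.empty) PySem.Dict.empty
  let rev := g.items.foldl (fun rev kv =>
      kv.2.foldl (fun rev t =>
        let rev := if rev.contains t then rev else rev.insert t PySem.Set.empty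
        rev.insert t ((rev.getD t PySem.Set.empty).add kv.1)) rev) rev
  rev.items

-- ===== PORT B =====
def reverse_graph_alt (graph : List (String × List String)) : List (String × List String) :=
  let g := PySem.Dict.ofList graph
  let ns := g.items.foldl (fun (p : List String × PySem.Set String) kv =>
      kv.2.foldl (fun p t =>
        if p.2.contains t then p else (p.1 ++ [t], p.2.add t)) p)
    (g.keys, PySem.Set.ofList g.keys)
  let tsets := g.items.map (fun p => (p.1, PySem.Set.ofList p.2))
  ns.1.map (fun n =>
    (n, PySem.Set.ofList ((tsets.filter (fun p => p.2.contains n)).map (fun p => p.1))))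

-- ===== PRECONDITION & SPEC =====
def Spec_reverse_graph (graph : List (String × List String)) (out : List (String × List String)) : Prop := out = reverse_graph_alt graph
instance (graph : List (String × List String)) (out : List (String × List String)) : Decidable (Spec_reverse_graph graph out) := by unfold Spec_reverse_graph; infer_instance

-- ===== CLAIM (what is proved, stated in full; the proofs are below) =====
def Claim_equal_reverse_graph : Prop := ∀ (graph : List (String × List String)), Dom_reverse_graph graph → Spec_reverse_graph graph (reverse_graph graph)

-- ===== LEMMAS AND PROOFS =====

-- Set.add is idempotent
theorem pv_add_add (s : PySem.Set String) (x : String) :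
    PySem.Set.add (PySem.Set.add s x) x = PySem.Set.add s x := by
  by_cases h : x ∈ s
  · simp [PySem.Set.add_of_mem h]
  · rw [PySem.Set.add_of_not_mem h, PySem.Set.add_of_mem (by simp)]

-- the state rebinding in A's inner loop body does not change the lookup at t
theorem pv_if_getD (t : String) (d : PySem.Dict String (PySem.Set String)) :
    (if d.contains t then d else d.insert t ([] : PySem.Set String)).getD t [] = d.getD t [] := by
  by_cases h : d.contains t
  · simp [h]
  · have h' : d.contains t = false := by simpa using h
    simp [h', PySem.Dict.getD_of_not_contains _ _ h']

-- one inner step of A: effect on a lookup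
theorem pv_inner_step_getD (src t : String) (d : PySem.Dict String (PySem.Set String)) (n : String) :
    ((if d.contains t then d else d.insert t ([] : PySem.Set String)).insert t
      (((if d.contains t then d else d.insert t ([] : PySem.Set String)).getD t []).add src)).getD n []
    = if n = t then (d.getD t []).add src else d.getD n [] := by
  rw [pv_if_getD]
  by_cases h : d.contains t
  · simp [h, PySem.Dict.getD_insert]
  · have h' : d.contains t = false := by simpa using h
    simp only [h', Bool.false_eq_true, if_false]
    rw [PySem.Dict.insert_insert_self]
    simp [PySem.Dict.getD_insert]

-- one inner step of A: effect on the key list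
theorem pv_inner_step_keys (src t : String) (d : PySem.Dict String (PySem.Set String)) :
    ((if d.contains t then d else d.insert t ([] : PySem.Set String)).insert t
      (((if d.contains t then d else d.insert t ([] : PySem.Set String)).getD t []).add src)).keys
    = PySem.Set.add d.keys t := by
  by_cases h : d.contains t
  · rw [if_pos h, PySem.Dict.keys_insert_of_contains _ _ h,
      PySem.Set.add_of_mem ((PySem.Dict.contains_iff_mem_keys _ _).mp h)]
  · have h' : d.contains t = false := by simpa using h
    simp only [h', Bool.false_eq_true, if_false]
    rw [PySem.Dict.insert_insert_self, PySem.Dict.keys_insert_of_not_contains _ _ h',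
      PySem.Set.add_of_not_mem (fun hm => by simp [(PySem.Dict.contains_iff_mem_keys _ _).mpr hm] at h')]

-- A's inner loop over one target list: lookup
theorem pv_inner_fold_getD (src : String) (ts : List String) (d : PySem.Dict String (PySem.Set String)) (n : String) :
    (ts.foldl (fun rev t =>
        (if rev.contains t then rev else rev.insert t ([] : PySem.Set String)).insert t
          (((if rev.contains t then rev else rev.insert t ([] : PySem.Set String)).getD t []).add src)) d).getD n []
    = if n ∈ ts then (d.getD n []).add src else d.getD n [] := by
  induction ts generalizing d with
  | nil => simp
  | cons t ts ih =>
    simp only [List.foldl_cons]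
    rw [ih]
    by_cases hnt : n = t
    · subst hnt
      by_cases hmem : n ∈ ts <;>
        simp [hmem, pv_add_add, pv_if_getD]
    · by_cases hmem : n ∈ ts <;> simp [hmem, hnt, pv_inner_step_getD]

-- A's inner loop over one target list: keys
theorem pv_inner_fold_keys (src : String) (ts : List String) (d : PySem.Dict String (PySem.Set String)) :
    (ts.foldl (fun rev t =>
        (if rev.contains t then rev else rev.insert t ([] : PySem.Set String)).insert t
          (((if rev.contains t then rev else rev.insert t ([] : PySem.Set String)).getD t []).add src)) d).keys
    = PySem.Set.update d.keys ts := by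
  induction ts generalizing d with
  | nil => simp [PySem.Set.update_nil]
  | cons t ts ih =>
    simp only [List.foldl_cons]
    rw [ih, PySem.Set.update_cons]
    exact congrArg (fun ks => PySem.Set.update ks ts) (pv_inner_step_keys src t d)

-- A's outer loop: lookup
theorem pv_outer_fold_getD (l : List (String × List String)) (d : PySem.Dict String (PySem.Set String)) (n : String) :
    (l.foldl (fun rev kv =>
        kv.2.foldl (fun rev t =>
          (if rev.contains t then rev else rev.insert t ([] : PySem.Set String)).insert t
            (((if rev.contains t then rev else rev.insert t ([] : PySem.Set String)).getD t []).add kv.1)) rev) d).getD n []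
    = l.foldl (fun s kv => if n ∈ kv.2 then PySem.Set.add s kv.1 else s) (d.getD n []) := by
  induction l generalizing d with
  | nil => rfl
  | cons kv l ih =>
    simp only [List.foldl_cons]
    rw [ih, pv_inner_fold_getD]

-- A's outer loop: keys
theorem pv_outer_fold_keys (l : List (String × List String)) (d : PySem.Dict String (PySem.Set String)) :
    (l.foldl (fun rev kv =>
        kv.2.foldl (fun rev t =>
          (if rev.contains t then rev else rev.insert t ([] : PySem.Set String)).insert t
            (((if rev.contains t then rev else rev.insert t ([] : PySem.Set String)).getD t []).add kv.1)) rev) d).keys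
    = l.foldl (fun ks kv => PySem.Set.update ks kv.2) d.keys := by
  induction l generalizing d with
  | nil => rfl
  | cons kv l ih =>
    simp only [List.foldl_cons]
    rw [ih, pv_inner_fold_keys]

-- A's initialisation dict: every lookup is the empty set
theorem pv_init_getD (l : List (String × List String)) (d : PySem.Dict String (PySem.Set String))
    (h : ∀ m, d.getD m [] = []) (n : String) :
    (l.foldl (fun rev kv => rev.insert kv.1 ([] : PySem.Set String)) d).getD n [] = [] := by
  induction l generalizing d with
  | nil => exact h n
  | cons kv l ih =>
    simp only [List.foldl_cons]
    exact ih _ (fun m => by rw [PySem.Dict.getD_insert]; split <;> [rfl; exact h m])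

-- A's initialisation dict: keys
theorem pv_init_keys (l : List (String × List String)) (d : PySem.Dict String (PySem.Set String)) :
    (l.foldl (fun rev kv => rev.insert kv.1 ([] : PySem.Set String)) d).keys
    = PySem.Set.update d.keys (l.map Prod.fst) := by
  induction l generalizing d with
  | nil => simp [PySem.Set.update_nil]
  | cons kv l ih =>
    simp only [List.foldl_cons, List.map_cons]
    rw [ih, PySem.Set.update_cons]
    by_cases h : d.contains kv.1
    · rw [PySem.Dict.keys_insert_of_contains _ _ h,
        PySem.Set.add_of_mem ((PySem.Dict.contains_iff_mem_keys _ _).mp h)]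
    · have h' : d.contains kv.1 = false := by simpa using h
      rw [PySem.Dict.keys_insert_of_not_contains _ _ h',
        PySem.Set.add_of_not_mem (fun hm => by simp [(PySem.Dict.contains_iff_mem_keys _ _).mpr hm] at h')]

-- the per-key scatter fold equals update-with-the-filtered-sources
theorem pv_value_fold (l : List (String × List String)) (n : String) (s0 : PySem.Set String) :
    l.foldl (fun s kv => if n ∈ kv.2 then PySem.Set.add s kv.1 else s) s0
    = PySem.Set.update s0 ((l.filter (fun p => p.2.contains n)).map (fun p => p.1)) := by
  induction l generalizing s0 with
  | nil => simp [PySem.Set.update_nil]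
  | cons kv l ih =>
    simp only [List.foldl_cons, List.filter_cons]
    by_cases h : n ∈ kv.2
    · have h' : kv.2.contains n = true := by simpa using h
      simp only [h, if_true, h', List.map_cons]
      rw [ih, PySem.Set.update_cons]
    · have h' : kv.2.contains n = false := by simpa using h
      simp [h, ih]

-- updates preserve Nodup through the outer fold
theorem pv_fold_update_nodup (l : List (String × List String)) (ks : List String) (h : ks.Nodup) :
    (l.foldl (fun ks kv => PySem.Set.update ks kv.2) ks).Nodup := by
  induction l generalizing ks with
  | nil => exact h
  | cons kv l ih => exact ih _ (PySem.Set.nodup_update _ _ h)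

-- B's inner loop keeps the pair invariant (snd = ofList fst) and folds Set.add over fst
theorem pv_b_inner (ts : List String) (ns : List String) :
    ts.foldl (fun p t => if p.2.contains t then p else (p.1 ++ [t], p.2.add t)) (ns, PySem.Set.ofList ns)
    = (PySem.Set.update ns ts, PySem.Set.ofList (PySem.Set.update ns ts)) := by
  induction ts generalizing ns with
  | nil => simp [PySem.Set.update_nil]
  | cons t ts ih =>
    simp only [List.foldl_cons]
    rw [PySem.Set.update_cons]
    by_cases h : t ∈ ns
    · have hc : (PySem.Set.ofList ns).contains t = true :=
        (PySem.Set.contains_iff _ _).mpr ((PySem.Set.mem_ofList _ _).mpr h)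
      simp only [hc, if_true]
      rw [PySem.Set.add_of_mem h]
      exact ih ns
    · have hc : (PySem.Set.ofList ns).contains t = false := by
        by_contra hne
        exact h ((PySem.Set.mem_ofList _ _).mp ((PySem.Set.contains_iff _ _).mp (by simpa using hne)))
      simp only [hc, Bool.false_eq_true, if_false]
      rw [PySem.Set.add_of_not_mem h, ← PySem.Set.ofList_append_singleton]
      exact ih (ns ++ [t])

-- B's outer loop
theorem pv_b_outer (l : List (String × List String)) (ns : List String) :
    l.foldl (fun p kv => kv.2.foldl (fun p t => if p.2.contains t then p else (p.1 ++ [t], p.2.add t)) p)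
      (ns, PySem.Set.ofList ns)
    = (l.foldl (fun ks kv => PySem.Set.update ks kv.2) ns,
       PySem.Set.ofList (l.foldl (fun ks kv => PySem.Set.update ks kv.2) ns)) := by
  induction l generalizing ns with
  | nil => rfl
  | cons kv l ih =>
    simp only [List.foldl_cons]
    rw [pv_b_inner, ih]

-- hashing the target lists does not change which sources pass the membership test
theorem pv_tsets_filter (l : List (String × List String)) (n : String) :
    ((l.map (fun p => (p.1, PySem.Set.ofList p.2))).filter (fun p => p.2.contains n)).map (fun p => p.1)
    = (l.filter (fun p => p.2.contains n)).map (fun p => p.1) := by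
  rw [List.filter_map, List.map_map]
  apply congrArg
  apply List.filter_congr
  intro p _
  by_cases hm : n ∈ p.2
  · have h1 : (PySem.Set.ofList p.2).contains n = true :=
      (PySem.Set.contains_iff _ _).mpr ((PySem.Set.mem_ofList _ _).mpr hm)
    have h2 : p.2.contains n = true := by simpa using hm
    simp [h1, h2, Function.comp]
  · have h1 : (PySem.Set.ofList p.2).contains n = false := by
      by_contra hne
      exact hm ((PySem.Set.mem_ofList _ _).mp ((PySem.Set.contains_iff _ _).mp (by simpa using hne)))
    have h2 : p.2.contains n = false := by simpa using hm
    simp [h1, h2, Function.comp]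

-- ===== VERDICT (by name: the statement is the Claim_ definition above) =====
theorem reverse_graph_spec : Claim_equal_reverse_graph := by
  intro graph _
  unfold Spec_reverse_graph reverse_graph reverse_graph_alt
  dsimp only
  simp only [show (PySem.Set.empty : PySem.Set String) = [] from rfl]
  set g := PySem.Dict.ofList graph with hg
  have hknd : g.keys.Nodup := PySem.Dict.nodup_keys_ofList graph
  have hkeys0 : (g.items.foldl (fun rev kv => rev.insert kv.1 ([] : PySem.Set String))
      (PySem.Dict.empty : PySem.Dict String (PySem.Set String))).keys = g.keys := by
    rw [pv_init_keys, PySem.Dict.keys_empty, PySem.Set.update_nil_left]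
    exact PySem.Set.ofList_eq_self_of_nodup _ hknd
  rw [pv_b_outer]
  have hfin_keys : (g.items.foldl (fun rev kv =>
      kv.2.foldl (fun rev t =>
        (if rev.contains t then rev else rev.insert t ([] : PySem.Set String)).insert t
          (PySem.Set.add ((if rev.contains t then rev else rev.insert t ([] : PySem.Set String)).getD t []) kv.1)) rev)
      ((g.items.foldl (fun rev kv => rev.insert kv.1 ([] : PySem.Set String)) PySem.Dict.empty : PySem.Dict String (PySem.Set String)))).keys
      = g.items.foldl (fun ks kv => PySem.Set.update ks kv.2) g.keys := by
    rw [pv_outer_fold_keys, hkeys0]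
  have hnd : (g.items.foldl (fun ks kv => PySem.Set.update ks kv.2) g.keys).Nodup :=
    pv_fold_update_nodup _ _ hknd
  rw [PySem.Dict.items_eq_map_keys _ (hfin_keys ▸ hnd) ([] : PySem.Set String), hfin_keys]
  refine List.map_congr_left (fun n _ => ?_)
  rw [pv_outer_fold_getD, pv_init_getD _ _ (fun m => PySem.Dict.getD_empty _ _), pv_value_fold,
    PySem.Set.update_nil_left, pv_tsets_filter]
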